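-- pv_equiv track=rewrite | github.com/wssun/EACS | Extractor_ classifier/make_label/make_dataset_label.py | split_code_to_blocks
-- ===== SOURCE A (Python) =====
-- def split_code_to_blocks(code_token_list):
--     first_lf_brace = True
--
--     lf_brace_up = 0
--
--     lf_bracket_up = 0
--     idxs = []
--
--     end_idx = 0
--
--     for idx, i in enumerate(code_token_list):
--         if i == ';' and not lf_brace_up and not lf_bracket_up:
--             idxs.append((end_idx, idx))
--             end_idx = idx + 1
--         elif i == '(':
--             lf_bracket_up += 1
--         elif i == ')':
--             lf_bracket_up -= 1
--         elif i == '{' and not first_lf_brace: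
--             lf_brace_up += 1
--         elif i == '}' and (lf_brace_up == 1):
--             idxs.append((end_idx, idx))
--             end_idx = idx + 1
--             lf_brace_up -= 1
--         elif i == '}' and (lf_brace_up != 1):
--             lf_brace_up -= 1
--         elif i == '{' and first_lf_brace:
--             idxs.append((0, idx))
--             end_idx = idx + 1
--             first_lf_brace = False
--
--     code_seqs = []
--     for idx, i in enumerate(idxs):
--         code_snap = code_token_list[i[0]:i[1] + 1]
--         if idx == 0:
--             code_seqs.append(' '.join(code_snap) + ' }')
--         else:
--             code_seqs.append(' '.join(code_snap))
--     return code_seqs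
-- ===== SOURCE B (Python) =====
-- def _emit(blocks, cur):
--     s = ' '.join(cur)
--     blocks.append(s + ' }' if not blocks else s)
--
--
-- def split_code_to_blocks(code_token_list):
--     first = True
--     brace = 0
--     bracket = 0
--     blocks = []
--     cur = []
--     for tok in code_token_list:
--         cur.append(tok)
--         if tok == ';' and brace == 0 and bracket == 0:
--             _emit(blocks, cur)
--             cur = []
--         elif tok == '(':
--             bracket += 1
--         elif tok == ')':
--             bracket -= 1
--         elif tok == '{':
--             if first:
--                 _emit(blocks, cur)
--                 cur = []
--                 first = False
--             else:
--                 brace += 1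
--         elif tok == '}':
--             if brace == 1:
--                 _emit(blocks, cur)
--                 cur = []
--             brace -= 1
--     return blocks
-- ===== Notes on version B (the rewrite author's own statement) =====
-- stated objective: simpler
-- what changed: B emits each block in a single pass by accumulating the current tokens and joining them at each boundary, instead of A's two-pass scheme of collecting (start,end) index pairs and then slicing and joining in a second loop.
-- intended difference: On inputs where a top-level ';' (no preceding '}' and balanced parentheses) occurs before the first '{', A's first-brace block restarts from index 0 and so repeats the already-emitted tokens before the ';' (e.g. ['a',';','{'] gives ['a ; }','a ; {']); B emits only the tokens since the last boundary ('{' alone), which is the intended non-overlapping split. — e.g. on split_code_to_blocks(["a", ";", "{"]): A returns ["a ; }", "a ; {"], B returns ["a ; }", "{"]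
import Mathlib
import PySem

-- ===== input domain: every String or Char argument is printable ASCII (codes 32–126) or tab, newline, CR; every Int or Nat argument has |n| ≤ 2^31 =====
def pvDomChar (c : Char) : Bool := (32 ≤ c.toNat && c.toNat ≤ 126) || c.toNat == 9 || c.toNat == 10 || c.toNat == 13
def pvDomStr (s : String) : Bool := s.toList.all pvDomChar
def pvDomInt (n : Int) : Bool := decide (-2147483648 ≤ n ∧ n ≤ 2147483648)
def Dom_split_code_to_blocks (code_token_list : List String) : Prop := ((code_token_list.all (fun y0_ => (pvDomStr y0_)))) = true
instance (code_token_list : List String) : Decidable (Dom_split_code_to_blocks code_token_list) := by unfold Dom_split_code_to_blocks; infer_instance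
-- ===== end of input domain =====

-- B changes A's two-pass index-pair-and-slice scheme into a single pass that accumulates the
-- current block's tokens and joins them at each boundary (objective: simpler); on inputs where a
-- top-level ';' precedes the first '{', A's overlapping first-brace block is replaced by the
-- intended non-overlapping one (see D_ below).

-- ===== PORT A =====
-- loop body of A's first for-loop: state (first_lf_brace, lf_brace_up, lf_bracket_up, idxs, end_idx)
def pvStepA (s : Bool × Int × Int × List (Int × Int) × Int) (p : Int × String) :
    Bool × Int × Int × List (Int × Int) × Int :=
  let first_lf_brace := s.1
  let lf_brace_up := s.2.1
  let lf_bracket_up := s.2.2.1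
  let idxs := s.2.2.2.1
  let end_idx := s.2.2.2.2
  let idx := p.1
  let i := p.2
  if i = ";" ∧ lf_brace_up = 0 ∧ lf_bracket_up = 0 then
    (first_lf_brace, lf_brace_up, lf_bracket_up, idxs ++ [(end_idx, idx)], idx + 1)
  else if i = "(" then (first_lf_brace, lf_brace_up, lf_bracket_up + 1, idxs, end_idx)
  else if i = ")" then (first_lf_brace, lf_brace_up, lf_bracket_up - 1, idxs, end_idx)
  else if i = "{" ∧ first_lf_brace = false then
    (first_lf_brace, lf_brace_up + 1, lf_bracket_up, idxs, end_idx)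
  else if i = "}" ∧ lf_brace_up = 1 then
    (first_lf_brace, lf_brace_up - 1, lf_bracket_up, idxs ++ [(end_idx, idx)], idx + 1)
  else if i = "}" ∧ lf_brace_up ≠ 1 then
    (first_lf_brace, lf_brace_up - 1, lf_bracket_up, idxs, end_idx)
  else if i = "{" ∧ first_lf_brace = true then
    (false, lf_brace_up, lf_bracket_up, idxs ++ [((0 : Int), idx)], idx + 1)
  else s

-- A's second for-loop: build code_seqs from the collected index pairs by slicing and joining
def pvRenderA (code_token_list : List String) (idxs : List (Int × Int)) : List String :=
  (PySem.List.enumerate idxs 0).foldl (fun code_seqs p =>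
    let idx := p.1
    let ii := p.2
    let code_snap := PySem.List.slice code_token_list (some ii.1) (some (ii.2 + 1))
    if idx = 0 then code_seqs ++ [PySem.Str.join " " code_snap ++ " }"]
    else code_seqs ++ [PySem.Str.join " " code_snap]) []

def split_code_to_blocks (code_token_list : List String) : List String :=
  let st := (PySem.List.enumerate code_token_list 0).foldl pvStepA
    (true, (0 : Int), (0 : Int), ([] : List (Int × Int)), (0 : Int))
  pvRenderA code_token_list st.2.2.2.1

-- ===== PORT B =====
-- B's emit helper: append the joined current block, ' }'-suffixed iff it is the first block
def pvEmit (blocks cur : List String) : List String :=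
  let s := PySem.Str.join " " cur
  blocks ++ [if blocks = [] then s ++ " }" else s]

-- loop body of B's single pass: state (first, brace, bracket, blocks, cur)
def pvStepB (s : Bool × Int × Int × List String × List String) (tok : String) :
    Bool × Int × Int × List String × List String :=
  let first := s.1
  let brace := s.2.1
  let bracket := s.2.2.1
  let blocks := s.2.2.2.1
  let cur := s.2.2.2.2 ++ [tok]
  if tok = ";" ∧ brace = 0 ∧ bracket = 0 then (first, brace, bracket, pvEmit blocks cur, [])
  else if tok = "(" then (first, brace, bracket + 1, blocks, cur)
  else if tok = ")" then (first, brace, bracket - 1, blocks, cur)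
  else if tok = "{" then
    if first then (false, brace, bracket, pvEmit blocks cur, [])
    else (first, brace + 1, bracket, blocks, cur)
  else if tok = "}" then
    if brace = 1 then (first, brace - 1, bracket, pvEmit blocks cur, [])
    else (first, brace - 1, bracket, blocks, cur)
  else (first, brace, bracket, blocks, cur)

def split_code_to_blocks_alt (code_token_list : List String) : List String :=
  (code_token_list.foldl pvStepB
    (true, (0 : Int), (0 : Int), ([] : List String), ([] : List String))).2.2.2.1

-- ===== PRECONDITION & SPEC =====
-- On inputs where a top-level ';' (no preceding '}', balanced parentheses, no preceding '{')
-- occurs before some later '{', A's first-brace block restarts from index 0 and repeats the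
-- already-emitted tokens; B emits only the tokens since the last boundary, the intended
-- non-overlapping split.
def D_split_code_to_blocks (code_token_list : List String) : Prop :=
  ((List.range code_token_list.length).any (fun i =>
    decide (code_token_list[i]? = some ";") &&
    decide ((code_token_list.take i).count "{" = 0) &&
    decide ((code_token_list.take i).count "}" = 0) &&
    decide ((code_token_list.take i).count "(" = (code_token_list.take i).count ")") &&
    (code_token_list.drop (i + 1)).any (fun t => t == "{"))) = true

instance (code_token_list : List String) : Decidable (D_split_code_to_blocks code_token_list) := by
  unfold D_split_code_to_blocks; infer_instance

def Spec_split_code_to_blocks (code_token_list : List String) (out : List String) : Prop :=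
  ¬ D_split_code_to_blocks code_token_list → out = split_code_to_blocks_alt code_token_list
instance (code_token_list : List String) (out : List String) : Decidable (Spec_split_code_to_blocks code_token_list out) := by
  unfold Spec_split_code_to_blocks; infer_instance

def pvDiffWitness_split_code_to_blocks : List String := ["a", ";", "{"]
def pvDiffWitnessOut_split_code_to_blocks : (List String) × (List String) :=
  (["a ; }", "a ; {"], ["a ; }", "{"])

-- ===== CLAIM (what is proved, stated in full; the proofs are below) =====
def Claim_unchanged_split_code_to_blocks : Prop := ∀ (code_token_list : List String), Dom_split_code_to_blocks code_token_list → Spec_split_code_to_blocks code_token_list (split_code_to_blocks code_token_list)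
def Claim_changed_split_code_to_blocks : Prop := Dom_split_code_to_blocks (pvDiffWitness_split_code_to_blocks) ∧ D_split_code_to_blocks (pvDiffWitness_split_code_to_blocks) ∧ split_code_to_blocks (pvDiffWitness_split_code_to_blocks) = pvDiffWitnessOut_split_code_to_blocks.1 ∧ split_code_to_blocks_alt (pvDiffWitness_split_code_to_blocks) = pvDiffWitnessOut_split_code_to_blocks.2 ∧ pvDiffWitnessOut_split_code_to_blocks.1 ≠ pvDiffWitnessOut_split_code_to_blocks.2

def Claim_exact_split_code_to_blocks : Prop := ∀ (code_token_list : List String), Dom_split_code_to_blocks code_token_list → D_split_code_to_blocks code_token_list → split_code_to_blocks code_token_list ≠ split_code_to_blocks_alt code_token_list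

-- ===== LEMMAS AND PROOFS =====

lemma pvRenderA_aux (code : List String) :
    ∀ (l : List (Int × Int)) (s : Int) (acc : List String),
      ((PySem.List.enumerate l s).foldl (fun code_seqs p =>
        let idx := p.1
        let ii := p.2
        let code_snap := PySem.List.slice code (some ii.1) (some (ii.2 + 1))
        if idx = 0 then code_seqs ++ [PySem.Str.join " " code_snap ++ " }"]
        else code_seqs ++ [PySem.Str.join " " code_snap]) acc).length = acc.length + l.length := by
  intro l
  induction l with
  | nil => intro s acc; simp [PySem.List.enumerate_nil]
  | cons x xs ih =>
    intro s acc
    rw [PySem.List.enumerate_cons, List.foldl_cons]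
    simp only []
    rw [ih]
    split_ifs <;> simp <;> omega

lemma pvRenderA_length (code : List String) (idxs : List (Int × Int)) :
    (pvRenderA code idxs).length = idxs.length := by
  unfold pvRenderA
  rw [pvRenderA_aux]
  simp

lemma pvRenderA_eq_nil_iff (code : List String) (idxs : List (Int × Int)) :
    pvRenderA code idxs = [] ↔ idxs = [] := by
  constructor
  · intro h
    have hl := pvRenderA_length code idxs
    rw [h] at hl
    simpa using (List.length_eq_zero_iff.mp hl.symm)
  · intro h; subst h; simp [pvRenderA, PySem.List.enumerate_nil]

lemma pvRenderA_append (code : List String) (idxs : List (Int × Int)) (q : Int × Int) :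
    pvRenderA code (idxs ++ [q]) =
      pvRenderA code idxs ++
        [if idxs = [] then PySem.Str.join " " (PySem.List.slice code (some q.1) (some (q.2 + 1))) ++ " }"
         else PySem.Str.join " " (PySem.List.slice code (some q.1) (some (q.2 + 1)))] := by
  unfold pvRenderA
  rw [PySem.List.enumerate_append, List.foldl_append, PySem.List.enumerate_cons,
    PySem.List.enumerate_nil, List.foldl_cons, List.foldl_nil]
  by_cases h : idxs = []
  · subst h; simp
  · have hl : (idxs.length : Int) ≠ 0 := by
      simpa [Int.natCast_eq_zero, List.length_eq_zero_iff] using h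
    simp [h]

lemma pv_D_of (code pre rest' : List String)
    (hcode : code = pre ++ ";" :: rest')
    (h1 : pre.count "{" = 0) (h2 : pre.count "}" = 0)
    (h3 : pre.count "(" = pre.count ")") (h4 : "{" ∈ rest') :
    D_split_code_to_blocks code := by
  subst hcode
  unfold D_split_code_to_blocks
  rw [List.any_eq_true]
  refine ⟨pre.length, List.mem_range.2 (by simp), ?_⟩
  have htake : (pre ++ ";" :: rest').take pre.length = pre := by simp
  have hdrop : (pre ++ ";" :: rest').drop (pre.length + 1) = rest' := by
    have h5 : pre ++ ";" :: rest' = (pre ++ [";"]) ++ rest' := by simp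
    have h6 : pre.length + 1 = (pre ++ [";"]).length := by simp
    rw [h5, h6]; simp
  simp [htake, hdrop, h1, h2, h3, List.any_eq_true]
  exact h4

lemma pv_take_snoc (pre : List String) (tok : String) (rest' : List String) :
    (pre ++ tok :: rest').take (pre.length + 1) = pre ++ [tok] := by
  induction pre with
  | nil => simp
  | cons x xs ih => simp [ih]

lemma pv_slice_emit (pre rest' : List String) (tok : String) (e : Nat) (he : e ≤ pre.length) :
    PySem.List.slice (pre ++ tok :: rest') (some (e : Int)) (some ((pre.length : Int) + 1))
      = pre.drop e ++ [tok] := by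
  have h1 : ((pre.length : Int) + 1) = (((pre.length + 1 : Nat)) : Int) := by push_cast; ring
  rw [h1, PySem.List.slice_natCast, List.take_drop]
  have h2 : e + (pre.length + 1 - e) = pre.length + 1 := by omega
  rw [h2, pv_take_snoc, List.drop_append_of_le_length he]

lemma pv_emit_eq (code : List String) (idxs : List (Int × Int)) (cur : List String)
    (a b : Int)
    (hs : PySem.List.slice code (some a) (some (b + 1)) = cur) :
    pvEmit (pvRenderA code idxs) cur = pvRenderA code (idxs ++ [(a, b)]) := by
  rw [pvRenderA_append]
  simp only [pvEmit, pvRenderA_eq_nil_iff, hs]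

lemma pv_loop (code : List String) (hD : ¬ D_split_code_to_blocks code) :
    ∀ (rest pre : List String) (first : Bool) (br bk : Int) (idxs : List (Int × Int)) (e : Nat),
      code = pre ++ rest → e ≤ pre.length →
      (first = true → pre.count "{" = 0 ∧ br = -(pre.count "}" : Int) ∧
        bk = (pre.count "(" : Int) - (pre.count ")" : Int)) →
      (first = true → "{" ∈ rest → e = 0) →
      pvRenderA code (((PySem.List.enumerate rest (pre.length : Int)).foldl pvStepA
          (first, br, bk, idxs, (e : Int))).2.2.2.1)
        = (rest.foldl pvStepB (first, br, bk, pvRenderA code idxs, pre.drop e)).2.2.2.1 := by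
  intro rest
  induction rest with
  | nil =>
    intro pre first br bk idxs e hcode he hfirst he0
    simp [PySem.List.enumerate_nil]
  | cons tok rest' ih =>
    intro pre first br bk idxs e hcode he hfirst he0
    rw [PySem.List.enumerate_cons, List.foldl_cons, List.foldl_cons]
    by_cases hs : tok = ";"
    · subst hs
      by_cases hz : br = 0 ∧ bk = 0
      · -- C1: top-level ';' — both emit
        obtain ⟨hbr, hbk⟩ := hz
        subst hbr; subst hbk
        have hA : pvStepA (first, (0:Int), (0:Int), idxs, (e : Int)) ((pre.length : Int), ";")
            = (first, (0:Int), (0:Int), idxs ++ [((e : Int), (pre.length : Int))], (pre.length : Int) + 1) := by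
          simp [pvStepA]
        have hB : pvStepB (first, (0:Int), (0:Int), pvRenderA code idxs, pre.drop e) ";"
            = (first, (0:Int), (0:Int), pvEmit (pvRenderA code idxs) (pre.drop e ++ [";"]), []) := by
          simp [pvStepB]
        rw [hA, hB,
          pv_emit_eq code idxs (pre.drop e ++ [";"]) (e : Int) (pre.length : Int)
            (by rw [hcode]; exact pv_slice_emit pre rest' ";" e he)]
        have he0' : first = true → "{" ∈ rest' → pre.length + 1 = 0 := by
          intro hf hm
          obtain ⟨h1, h2, h3⟩ := hfirst hf
          have h2' : pre.count "}" = 0 := by omega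
          have h3' : pre.count "(" = pre.count ")" := by omega
          exact (hD (pv_D_of code pre rest' hcode h1 h2' h3' hm)).elim
        have := ih (pre ++ [";"]) first 0 0 (idxs ++ [((e : Int), (pre.length : Int))])
          (pre.length + 1) (by simp [hcode]) (by simp)
          (fun hf => by
            obtain ⟨h1', h2', h3'⟩ := hfirst hf
            refine ⟨?_, ?_, ?_⟩ <;>
              (simp [List.count_append, List.count_nil, h1']; try omega))
          he0'
        simpa using this
      · -- C2: ';' inside parens/braces — no emit in either
        have hA : pvStepA (first, br, bk, idxs, (e : Int)) ((pre.length : Int), ";")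
            = (first, br, bk, idxs, (e : Int)) := by
          simp [pvStepA, hz]
        have hB : pvStepB (first, br, bk, pvRenderA code idxs, pre.drop e) ";"
            = (first, br, bk, pvRenderA code idxs, pre.drop e ++ [";"]) := by
          simp [pvStepB, hz]
        rw [hA, hB]
        have := ih (pre ++ [";"]) first br bk idxs e (by simp [hcode]) (by simp; omega)
          (fun hf => by
            obtain ⟨h1', h2', h3'⟩ := hfirst hf
            refine ⟨?_, ?_, ?_⟩ <;>
              (simp [List.count_append, List.count_nil, h1']; try omega))
          (fun hf hm => he0 hf (by simp [hm]))
        simpa [List.drop_append_of_le_length he] using this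
    · by_cases hlp : tok = "("
      · -- C3: '('
        subst hlp
        have hA : pvStepA (first, br, bk, idxs, (e : Int)) ((pre.length : Int), "(")
            = (first, br, bk + 1, idxs, (e : Int)) := by simp [pvStepA]
        have hB : pvStepB (first, br, bk, pvRenderA code idxs, pre.drop e) "("
            = (first, br, bk + 1, pvRenderA code idxs, pre.drop e ++ ["("]) := by simp [pvStepB]
        rw [hA, hB]
        have := ih (pre ++ ["("]) first br (bk + 1) idxs e (by simp [hcode]) (by simp; omega)
          (fun hf => by
            obtain ⟨h1', h2', h3'⟩ := hfirst hf
            refine ⟨?_, ?_, ?_⟩ <;>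
              (simp [List.count_append, List.count_nil, h1']; try omega))
          (fun hf hm => he0 hf (by simp [hm]))
        simpa [List.drop_append_of_le_length he] using this
      · by_cases hrp : tok = ")"
        · -- C4: ')'
          subst hrp
          have hA : pvStepA (first, br, bk, idxs, (e : Int)) ((pre.length : Int), ")")
              = (first, br, bk - 1, idxs, (e : Int)) := by simp [pvStepA]
          have hB : pvStepB (first, br, bk, pvRenderA code idxs, pre.drop e) ")"
              = (first, br, bk - 1, pvRenderA code idxs, pre.drop e ++ [")"]) := by simp [pvStepB]
          rw [hA, hB]
          have := ih (pre ++ [")"]) first br (bk - 1) idxs e (by simp [hcode]) (by simp; omega)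
            (fun hf => by
              obtain ⟨h1', h2', h3'⟩ := hfirst hf
              refine ⟨?_, ?_, ?_⟩ <;>
                (simp [List.count_append, List.count_nil, h1']; try omega))
            (fun hf hm => he0 hf (by simp [hm]))
          simpa [List.drop_append_of_le_length he] using this
        · by_cases hlb : tok = "{"
          · subst hlb
            by_cases hf : first = true
            · -- C6: first '{' — both emit; end_idx is 0 here (he0)
              subst hf
              have he' : e = 0 := he0 rfl (List.mem_cons_self)
              subst he'
              have hA : pvStepA (true, br, bk, idxs, ((0 : Nat) : Int)) ((pre.length : Int), "{")
                  = (false, br, bk, idxs ++ [((0 : Int), (pre.length : Int))], (pre.length : Int) + 1) := by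
                simp [pvStepA]
              have hB : pvStepB (true, br, bk, pvRenderA code idxs, pre.drop 0) "{"
                  = (false, br, bk, pvEmit (pvRenderA code idxs) (pre.drop 0 ++ ["{"]), []) := by
                simp [pvStepB]
              rw [hA, hB,
                pv_emit_eq code idxs (pre.drop 0 ++ ["{"]) (0 : Int) (pre.length : Int)
                  (by rw [hcode]
                      have := pv_slice_emit pre rest' "{" 0 (Nat.zero_le _)
                      simpa using this)]
              have := ih (pre ++ ["{"]) false br bk (idxs ++ [((0 : Int), (pre.length : Int))])
                (pre.length + 1) (by simp [hcode]) (by simp)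
                (fun hff => by cases hff) (fun hff => by cases hff)
              simpa using this
            · -- C5: nested '{'
              have hf' : first = false := by simpa using hf
              subst hf'
              have hA : pvStepA (false, br, bk, idxs, (e : Int)) ((pre.length : Int), "{")
                  = (false, br + 1, bk, idxs, (e : Int)) := by simp [pvStepA]
              have hB : pvStepB (false, br, bk, pvRenderA code idxs, pre.drop e) "{"
                  = (false, br + 1, bk, pvRenderA code idxs, pre.drop e ++ ["{"]) := by
                simp [pvStepB]
              rw [hA, hB]
              have := ih (pre ++ ["{"]) false (br + 1) bk idxs e (by simp [hcode])
                (by simp; omega) (fun hff => by cases hff) (fun hff => by cases hff)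
              simpa [List.drop_append_of_le_length he] using this
          · by_cases hrb : tok = "}"
            · subst hrb
              by_cases h1 : br = 1
              · -- C7: closing '}' of the first-level brace — both emit
                subst h1
                have hnf : first = false := by
                  cases first
                  · rfl
                  · obtain ⟨_, h2', _⟩ := hfirst rfl
                    omega
                subst hnf
                have hA : pvStepA (false, (1 : Int), bk, idxs, (e : Int)) ((pre.length : Int), "}")
                    = (false, (1 : Int) - 1, bk, idxs ++ [((e : Int), (pre.length : Int))], (pre.length : Int) + 1) := by
                  simp [pvStepA]
                have hB : pvStepB (false, (1 : Int), bk, pvRenderA code idxs, pre.drop e) "}"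
                    = (false, (1 : Int) - 1, bk, pvEmit (pvRenderA code idxs) (pre.drop e ++ ["}"]), []) := by
                  simp [pvStepB]
                rw [hA, hB,
                  pv_emit_eq code idxs (pre.drop e ++ ["}"]) (e : Int) (pre.length : Int)
                    (by rw [hcode]; exact pv_slice_emit pre rest' "}" e he)]
                have := ih (pre ++ ["}"]) false ((1 : Int) - 1) bk
                  (idxs ++ [((e : Int), (pre.length : Int))])
                  (pre.length + 1) (by simp [hcode]) (by simp)
                  (fun hff => by cases hff) (fun hff => by cases hff)
                simpa using this
              · -- C8: unmatched / nested '}'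
                have hA : pvStepA (first, br, bk, idxs, (e : Int)) ((pre.length : Int), "}")
                    = (first, br - 1, bk, idxs, (e : Int)) := by simp [pvStepA, h1]
                have hB : pvStepB (first, br, bk, pvRenderA code idxs, pre.drop e) "}"
                    = (first, br - 1, bk, pvRenderA code idxs, pre.drop e ++ ["}"]) := by
                  simp [pvStepB, h1]
                rw [hA, hB]
                have := ih (pre ++ ["}"]) first (br - 1) bk idxs e (by simp [hcode])
                  (by simp; omega)
                  (fun hfv => by
                    obtain ⟨h1', h2', h3'⟩ := hfirst hfv
                    refine ⟨?_, ?_, ?_⟩ <;>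
                      (simp [List.count_append, List.count_nil, h1']; try omega))
                  (fun hfv hm => he0 hfv (by simp [hm]))
                simpa [List.drop_append_of_le_length he] using this
            · -- C9: ordinary token
              have hA : pvStepA (first, br, bk, idxs, (e : Int)) ((pre.length : Int), tok)
                  = (first, br, bk, idxs, (e : Int)) := by
                simp [pvStepA, hs, hlp, hrp, hlb, hrb]
              have hB : pvStepB (first, br, bk, pvRenderA code idxs, pre.drop e) tok
                  = (first, br, bk, pvRenderA code idxs, pre.drop e ++ [tok]) := by
                simp [pvStepB, hs, hlp, hrp, hlb, hrb]
              rw [hA, hB]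
              have := ih (pre ++ [tok]) first br bk idxs e (by simp [hcode]) (by simp; omega)
                (fun hfv => by
                  obtain ⟨h1', h2', h3'⟩ := hfirst hfv
                  refine ⟨?_, ?_, ?_⟩ <;>
                    (simp [List.count_append, List.count_nil, h1',
                      hlb, hrb, hlp, hrp]; try omega))
                (fun hfv hm => he0 hfv (by simp [hm]))
              simpa [List.drop_append_of_le_length he] using this

-- tightness machinery: pvTrig scans the suffix (while first_lf_brace is still true) and decides
-- whether a first-'{' emission with a nonzero end_idx (the divergence) will be reached
def pvTrig : List String → Int → Int → Bool → Bool
  | [], _, _, _ => false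
  | t :: r, br, bk, em =>
    if t = "{" then em
    else if t = ";" ∧ br = 0 ∧ bk = 0 then pvTrig r br bk true
    else if t = "(" then pvTrig r br (bk + 1) em
    else if t = ")" then pvTrig r br (bk - 1) em
    else if t = "}" then (if br = 1 then pvTrig r (br - 1) bk true else pvTrig r (br - 1) bk em)
    else pvTrig r br bk em

lemma pvEmit_ne_nil (blocks cur : List String) : pvEmit blocks cur ≠ [] := by simp [pvEmit]

lemma pv_tail (code : List String) :
    ∀ (rest pre : List String) (br bk : Int) (idxs : List (Int × Int)) (e : Nat),
      code = pre ++ rest → e ≤ pre.length → idxs ≠ [] →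
      ∃ T : List String,
        pvRenderA code (((PySem.List.enumerate rest (pre.length : Int)).foldl pvStepA
            (false, br, bk, idxs, (e : Int))).2.2.2.1) = pvRenderA code idxs ++ T ∧
        ∀ B0 : List String, B0 ≠ [] →
          (rest.foldl pvStepB (false, br, bk, B0, pre.drop e)).2.2.2.1 = B0 ++ T := by
  intro rest
  induction rest with
  | nil =>
    intro pre br bk idxs e hcode he hidxs
    exact ⟨[], by simp [PySem.List.enumerate_nil], fun B0 _ => by simp⟩
  | cons tok rest' ih =>
    intro pre br bk idxs e hcode he hidxs
    rw [PySem.List.enumerate_cons, List.foldl_cons]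
    by_cases hs : tok = ";"
    · subst hs
      by_cases hz : br = 0 ∧ bk = 0
      · obtain ⟨hbr, hbk⟩ := hz
        subst hbr; subst hbk
        have hA : pvStepA (false, (0:Int), (0:Int), idxs, (e : Int)) ((pre.length : Int), ";")
            = (false, 0, 0, idxs ++ [((e : Int), (pre.length : Int))], (pre.length : Int) + 1) := by
          simp [pvStepA]
        rw [hA]
        obtain ⟨T', h1, h2⟩ := ih (pre ++ [";"]) 0 0 (idxs ++ [((e : Int), (pre.length : Int))])
          (pre.length + 1) (by simp [hcode]) (by simp) (by simp)
        have hsl : PySem.List.slice code (some (e : Int)) (some ((pre.length : Int) + 1))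
            = pre.drop e ++ [";"] := by
          rw [hcode]; exact pv_slice_emit pre rest' ";" e he
        have hr : pvRenderA code (idxs ++ [((e : Int), (pre.length : Int))])
            = pvRenderA code idxs ++ [PySem.Str.join " " (pre.drop e ++ [";"])] := by
          rw [pvRenderA_append]; simp [hidxs, hsl]
        rw [hr] at h1
        refine ⟨[PySem.Str.join " " (pre.drop e ++ [";"])] ++ T', by simpa [List.append_assoc] using h1, ?_⟩
        intro B0 hB0
        rw [List.foldl_cons]
        have hB : pvStepB (false, (0:Int), (0:Int), B0, pre.drop e) ";"
            = (false, 0, 0, pvEmit B0 (pre.drop e ++ [";"]), []) := by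
          simp [pvStepB]
        rw [hB]
        have h2' := h2 (pvEmit B0 (pre.drop e ++ [";"])) (pvEmit_ne_nil _ _)
        have hemit : pvEmit B0 (pre.drop e ++ [";"])
            = B0 ++ [PySem.Str.join " " (pre.drop e ++ [";"])] := by
          simp [pvEmit, hB0]
        rw [hemit] at h2'
        rw [hemit]
        simpa [List.append_assoc] using h2'
      · have hA : pvStepA (false, br, bk, idxs, (e : Int)) ((pre.length : Int), ";")
            = (false, br, bk, idxs, (e : Int)) := by simp [pvStepA, hz]
        rw [hA]
        obtain ⟨T', h1, h2⟩ := ih (pre ++ [";"]) br bk idxs e (by simp [hcode]) (by simp; omega) hidxs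
        refine ⟨T', by simpa using h1, ?_⟩
        intro B0 hB0
        rw [List.foldl_cons]
        have hB : pvStepB (false, br, bk, B0, pre.drop e) ";"
            = (false, br, bk, B0, pre.drop e ++ [";"]) := by simp [pvStepB, hz]
        rw [hB]
        have := h2 B0 hB0
        simpa [List.drop_append_of_le_length he] using this
    · by_cases hlp : tok = "("
      · subst hlp
        have hA : pvStepA (false, br, bk, idxs, (e : Int)) ((pre.length : Int), "(")
            = (false, br, bk + 1, idxs, (e : Int)) := by simp [pvStepA]
        rw [hA]
        obtain ⟨T', h1, h2⟩ := ih (pre ++ ["("]) br (bk + 1) idxs e (by simp [hcode]) (by simp; omega) hidxs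
        refine ⟨T', by simpa using h1, ?_⟩
        intro B0 hB0
        rw [List.foldl_cons]
        have hB : pvStepB (false, br, bk, B0, pre.drop e) "("
            = (false, br, bk + 1, B0, pre.drop e ++ ["("]) := by simp [pvStepB]
        rw [hB]
        have := h2 B0 hB0
        simpa [List.drop_append_of_le_length he] using this
      · by_cases hrp : tok = ")"
        · subst hrp
          have hA : pvStepA (false, br, bk, idxs, (e : Int)) ((pre.length : Int), ")")
              = (false, br, bk - 1, idxs, (e : Int)) := by simp [pvStepA]
          rw [hA]
          obtain ⟨T', h1, h2⟩ := ih (pre ++ [")"]) br (bk - 1) idxs e (by simp [hcode]) (by simp; omega) hidxs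
          refine ⟨T', by simpa using h1, ?_⟩
          intro B0 hB0
          rw [List.foldl_cons]
          have hB : pvStepB (false, br, bk, B0, pre.drop e) ")"
              = (false, br, bk - 1, B0, pre.drop e ++ [")"]) := by simp [pvStepB]
          rw [hB]
          have := h2 B0 hB0
          simpa [List.drop_append_of_le_length he] using this
        · by_cases hlb : tok = "{"
          · subst hlb
            have hA : pvStepA (false, br, bk, idxs, (e : Int)) ((pre.length : Int), "{")
                = (false, br + 1, bk, idxs, (e : Int)) := by simp [pvStepA]
            rw [hA]
            obtain ⟨T', h1, h2⟩ := ih (pre ++ ["{"]) (br + 1) bk idxs e (by simp [hcode]) (by simp; omega) hidxs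
            refine ⟨T', by simpa using h1, ?_⟩
            intro B0 hB0
            rw [List.foldl_cons]
            have hB : pvStepB (false, br, bk, B0, pre.drop e) "{"
                = (false, br + 1, bk, B0, pre.drop e ++ ["{"]) := by simp [pvStepB]
            rw [hB]
            have := h2 B0 hB0
            simpa [List.drop_append_of_le_length he] using this
          · by_cases hrb : tok = "}"
            · subst hrb
              by_cases h1z : br = 1
              · subst h1z
                have hA : pvStepA (false, (1:Int), bk, idxs, (e : Int)) ((pre.length : Int), "}")
                    = (false, (1:Int) - 1, bk, idxs ++ [((e : Int), (pre.length : Int))], (pre.length : Int) + 1) := by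
                  simp [pvStepA]
                rw [hA]
                obtain ⟨T', h1, h2⟩ := ih (pre ++ ["}"]) ((1:Int) - 1) bk
                  (idxs ++ [((e : Int), (pre.length : Int))]) (pre.length + 1)
                  (by simp [hcode]) (by simp) (by simp)
                have hsl : PySem.List.slice code (some (e : Int)) (some ((pre.length : Int) + 1))
                    = pre.drop e ++ ["}"] := by
                  rw [hcode]; exact pv_slice_emit pre rest' "}" e he
                have hr : pvRenderA code (idxs ++ [((e : Int), (pre.length : Int))])
                    = pvRenderA code idxs ++ [PySem.Str.join " " (pre.drop e ++ ["}"])] := by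
                  rw [pvRenderA_append]; simp [hidxs, hsl]
                rw [hr] at h1
                refine ⟨[PySem.Str.join " " (pre.drop e ++ ["}"])] ++ T', by simpa [List.append_assoc] using h1, ?_⟩
                intro B0 hB0
                rw [List.foldl_cons]
                have hB : pvStepB (false, (1:Int), bk, B0, pre.drop e) "}"
                    = (false, (1:Int) - 1, bk, pvEmit B0 (pre.drop e ++ ["}"]), []) := by
                  simp [pvStepB]
                rw [hB]
                have h2' := h2 (pvEmit B0 (pre.drop e ++ ["}"])) (pvEmit_ne_nil _ _)
                have hemit : pvEmit B0 (pre.drop e ++ ["}"])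
                    = B0 ++ [PySem.Str.join " " (pre.drop e ++ ["}"])] := by
                  simp [pvEmit, hB0]
                rw [hemit] at h2'
                rw [hemit]
                simpa [List.append_assoc] using h2'
              · have hA : pvStepA (false, br, bk, idxs, (e : Int)) ((pre.length : Int), "}")
                    = (false, br - 1, bk, idxs, (e : Int)) := by simp [pvStepA, h1z]
                rw [hA]
                obtain ⟨T', h1, h2⟩ := ih (pre ++ ["}"]) (br - 1) bk idxs e (by simp [hcode]) (by simp; omega) hidxs
                refine ⟨T', by simpa using h1, ?_⟩
                intro B0 hB0
                rw [List.foldl_cons]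
                have hB : pvStepB (false, br, bk, B0, pre.drop e) "}"
                    = (false, br - 1, bk, B0, pre.drop e ++ ["}"]) := by simp [pvStepB, h1z]
                rw [hB]
                have := h2 B0 hB0
                simpa [List.drop_append_of_le_length he] using this
            · have hA : pvStepA (false, br, bk, idxs, (e : Int)) ((pre.length : Int), tok)
                  = (false, br, bk, idxs, (e : Int)) := by simp [pvStepA, hs, hlp, hrp, hlb, hrb]
              rw [hA]
              obtain ⟨T', h1, h2⟩ := ih (pre ++ [tok]) br bk idxs e (by simp [hcode]) (by simp; omega) hidxs
              refine ⟨T', by simpa using h1, ?_⟩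
              intro B0 hB0
              rw [List.foldl_cons]
              have hB : pvStepB (false, br, bk, B0, pre.drop e) tok
                  = (false, br, bk, B0, pre.drop e ++ [tok]) := by simp [pvStepB, hs, hlp, hrp, hlb, hrb]
              rw [hB]
              have := h2 B0 hB0
              simpa [List.drop_append_of_le_length he] using this

lemma pv_chars_join_len (s : List Char) (hs : s ≠ []) :
    ∀ (u v : List (List Char)), u ≠ [] → v ≠ [] →
      (PySem.Chars.join s v).length < (PySem.Chars.join s (u ++ v)).length := by
  intro u
  induction u with
  | nil => intro v hu hv; exact absurd rfl hu
  | cons x u' ih =>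
    intro v hu hv
    cases u' with
    | nil =>
      cases v with
      | nil => exact absurd rfl hv
      | cons y v' =>
        have h2 : PySem.Chars.join s (x :: y :: v') = x ++ s ++ PySem.Chars.join s (y :: v') :=
          PySem.Chars.join_cons_cons ..
        have hs' : 0 < s.length := List.length_pos_of_ne_nil hs
        have h3 : ([x] ++ y :: v') = x :: y :: v' := by simp
        rw [h3, h2]
        simp only [List.length_append]
        omega
    | cons z u'' =>
      have h1 := ih v (by simp) hv
      have h3 : ((x :: z :: u'') ++ v) = x :: z :: (u'' ++ v) := by simp
      have h4 : ((z :: u'') ++ v) = z :: (u'' ++ v) := by simp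
      rw [h4] at h1
      have h2 : PySem.Chars.join s (x :: z :: (u'' ++ v)) = x ++ s ++ PySem.Chars.join s (z :: (u'' ++ v)) :=
        PySem.Chars.join_cons_cons ..
      rw [h3, h2]
      simp only [List.length_append]
      omega

lemma pv_join_ne (u v : List String) (hu : u ≠ []) (hv : v ≠ []) :
    PySem.Str.join " " (u ++ v) ≠ PySem.Str.join " " v := by
  intro h
  have h2 := congrArg String.toList h
  rw [PySem.Str.toList_join, PySem.Str.toList_join, List.map_append] at h2
  have hlen := congrArg List.length h2
  have hlt := pv_chars_join_len (" ".toList) (by simp) (u.map String.toList) (v.map String.toList)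
    (by simpa using hu) (by simpa using hv)
  omega

lemma pv_loop_ne (code : List String) :
    ∀ (rest pre : List String) (br bk : Int) (idxs : List (Int × Int)) (e : Nat),
      code = pre ++ rest → e ≤ pre.length →
      pre.count "{" = 0 → br = -(pre.count "}" : Int) →
      bk = (pre.count "(" : Int) - (pre.count ")" : Int) →
      (0 < e ↔ idxs ≠ []) →
      pvTrig rest br bk (decide (0 < e)) = true →
      pvRenderA code (((PySem.List.enumerate rest (pre.length : Int)).foldl pvStepA
          (true, br, bk, idxs, (e : Int))).2.2.2.1)
        ≠ (rest.foldl pvStepB (true, br, bk, pvRenderA code idxs, pre.drop e)).2.2.2.1 := by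
  intro rest
  induction rest with
  | nil =>
    intro pre br bk idxs e hcode he h1 h2 h3 hiff htrig
    simp [pvTrig] at htrig
  | cons tok rest' ih =>
    intro pre br bk idxs e hcode he h1 h2 h3 hiff htrig
    rw [PySem.List.enumerate_cons, List.foldl_cons, List.foldl_cons]
    by_cases hlb : tok = "{"
    · -- the divergence step: first '{' with a pending nonzero end_idx
      subst hlb
      have hem : (0 < e) := by
        have : decide (0 < e) = true := by
          simp only [pvTrig] at htrig
          simpa using htrig
        simpa using this
      have hidxs : idxs ≠ [] := hiff.mp hem
      have hA : pvStepA (true, br, bk, idxs, (e : Int)) ((pre.length : Int), "{")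
          = (false, br, bk, idxs ++ [((0 : Int), (pre.length : Int))], (pre.length : Int) + 1) := by
        simp [pvStepA]
      have hB : pvStepB (true, br, bk, pvRenderA code idxs, pre.drop e) "{"
          = (false, br, bk, pvEmit (pvRenderA code idxs) (pre.drop e ++ ["{"]), []) := by
        simp [pvStepB]
      rw [hA, hB]
      obtain ⟨T, hTA, hTB⟩ := pv_tail code rest' (pre ++ ["{"]) br bk
        (idxs ++ [((0 : Int), (pre.length : Int))]) (pre.length + 1)
        (by simp [hcode]) (by simp) (by simp)
      have hTB' := hTB (pvEmit (pvRenderA code idxs) (pre.drop e ++ ["{"])) (pvEmit_ne_nil _ _)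
      have hsl0 : PySem.List.slice code (some (0 : Int)) (some ((pre.length : Int) + 1))
          = pre ++ ["{"] := by
        rw [hcode]
        have := pv_slice_emit pre rest' "{" 0 (Nat.zero_le _)
        simpa using this
      have hr : pvRenderA code (idxs ++ [((0 : Int), (pre.length : Int))])
          = pvRenderA code idxs ++ [PySem.Str.join " " (pre ++ ["{"])] := by
        rw [pvRenderA_append]; simp [hidxs, hsl0]
      have hemit : pvEmit (pvRenderA code idxs) (pre.drop e ++ ["{"])
          = pvRenderA code idxs ++ [PySem.Str.join " " (pre.drop e ++ ["{"])] := by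
        have : pvRenderA code idxs ≠ [] := by
          rw [Ne, pvRenderA_eq_nil_iff]; exact hidxs
        simp [pvEmit, this]
      have hTB2 : (rest'.foldl pvStepB
          (false, br, bk, pvEmit (pvRenderA code idxs) (pre.drop e ++ ["{"]), [])).2.2.2.1
          = pvEmit (pvRenderA code idxs) (pre.drop e ++ ["{"]) ++ T := by
        simpa using hTB'
      rw [show ((pre.length : Int) + 1) = (((pre.length + 1 : Nat)) : Int) by push_cast; ring]
      rw [show ((pre ++ ["{"]).length : Int) = ((pre.length + 1 : Nat) : Int) by simp] at hTA
      rw [hTA, hTB2, hr, hemit]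
      intro hcontra
      rw [List.append_assoc, List.append_assoc] at hcontra
      have h' := List.append_cancel_left hcontra
      have hjoin : PySem.Str.join " " (pre ++ ["{"]) = PySem.Str.join " " (pre.drop e ++ ["{"]) := by
        simpa using h'
      have hsplit : pre ++ ["{"] = pre.take e ++ (pre.drop e ++ ["{"]) := by
        rw [← List.append_assoc, List.take_append_drop]
      rw [hsplit] at hjoin
      exact pv_join_ne (pre.take e) (pre.drop e ++ ["{"])
        (by
          have : e ≤ pre.length := he
          intro hnil
          rw [List.take_eq_nil_iff] at hnil
          rcases hnil with h | h
          · omega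
          · subst h; simp at he; omega)
        (by simp) hjoin
    · by_cases hs : tok = ";"
      · subst hs
        by_cases hz : br = 0 ∧ bk = 0
        · obtain ⟨hbr, hbk⟩ := hz
          subst hbr; subst hbk
          have htrig' : pvTrig rest' 0 0 true = true := by
            simp only [pvTrig] at htrig
            simpa using htrig
          have hA : pvStepA (true, (0:Int), (0:Int), idxs, (e : Int)) ((pre.length : Int), ";")
              = (true, 0, 0, idxs ++ [((e : Int), (pre.length : Int))], (pre.length : Int) + 1) := by
            simp [pvStepA]
          have hB : pvStepB (true, (0:Int), (0:Int), pvRenderA code idxs, pre.drop e) ";"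
              = (true, 0, 0, pvEmit (pvRenderA code idxs) (pre.drop e ++ [";"]), []) := by
            simp [pvStepB]
          rw [hA, hB,
            pv_emit_eq code idxs (pre.drop e ++ [";"]) (e : Int) (pre.length : Int)
              (by rw [hcode]; exact pv_slice_emit pre rest' ";" e he)]
          have := ih (pre ++ [";"]) 0 0 (idxs ++ [((e : Int), (pre.length : Int))]) (pre.length + 1)
            (by simp [hcode]) (by simp)
            (by simp [List.count_append, List.count_nil, h1])
            (by simp [List.count_append, List.count_nil]; omega)
            (by simp [List.count_append, List.count_nil]; omega)
            (by simp)
            (by simpa using htrig')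
          simpa using this
        · have hA : pvStepA (true, br, bk, idxs, (e : Int)) ((pre.length : Int), ";")
              = (true, br, bk, idxs, (e : Int)) := by simp [pvStepA, hz]
          have hB : pvStepB (true, br, bk, pvRenderA code idxs, pre.drop e) ";"
              = (true, br, bk, pvRenderA code idxs, pre.drop e ++ [";"]) := by simp [pvStepB, hz]
          rw [hA, hB]
          have htrig' : pvTrig rest' br bk (decide (0 < e)) = true := by
            simp only [pvTrig] at htrig
            simpa [hz] using htrig
          have := ih (pre ++ [";"]) br bk idxs e (by simp [hcode]) (by simp; omega)
            (by simp [List.count_append, List.count_nil, h1])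
            (by simp [List.count_append, List.count_nil]; omega)
            (by simp [List.count_append, List.count_nil]; omega)
            hiff htrig'
          simpa [List.drop_append_of_le_length he] using this
      · by_cases hlp : tok = "("
        · subst hlp
          have hA : pvStepA (true, br, bk, idxs, (e : Int)) ((pre.length : Int), "(")
              = (true, br, bk + 1, idxs, (e : Int)) := by simp [pvStepA]
          have hB : pvStepB (true, br, bk, pvRenderA code idxs, pre.drop e) "("
              = (true, br, bk + 1, pvRenderA code idxs, pre.drop e ++ ["("]) := by simp [pvStepB]
          rw [hA, hB]
          have htrig' : pvTrig rest' br (bk + 1) (decide (0 < e)) = true := by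
            simp only [pvTrig] at htrig
            simpa using htrig
          have := ih (pre ++ ["("]) br (bk + 1) idxs e (by simp [hcode]) (by simp; omega)
            (by simp [List.count_append, List.count_nil, h1])
            (by simp [List.count_append, List.count_nil]; omega)
            (by simp [List.count_append, List.count_nil]; omega)
            hiff htrig'
          simpa [List.drop_append_of_le_length he] using this
        · by_cases hrp : tok = ")"
          · subst hrp
            have hA : pvStepA (true, br, bk, idxs, (e : Int)) ((pre.length : Int), ")")
                = (true, br, bk - 1, idxs, (e : Int)) := by simp [pvStepA]
            have hB : pvStepB (true, br, bk, pvRenderA code idxs, pre.drop e) ")"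
                = (true, br, bk - 1, pvRenderA code idxs, pre.drop e ++ [")"]) := by simp [pvStepB]
            rw [hA, hB]
            have htrig' : pvTrig rest' br (bk - 1) (decide (0 < e)) = true := by
              simp only [pvTrig] at htrig
              simpa using htrig
            have := ih (pre ++ [")"]) br (bk - 1) idxs e (by simp [hcode]) (by simp; omega)
              (by simp [List.count_append, List.count_nil, h1])
              (by simp [List.count_append, List.count_nil]; omega)
              (by simp [List.count_append, List.count_nil]; omega)
              hiff htrig'
            simpa [List.drop_append_of_le_length he] using this
          · by_cases hrb : tok = "}"
            · subst hrb
              have hbr1 : br ≠ 1 := by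
                intro hb
                rw [hb] at h2
                omega
              have hA : pvStepA (true, br, bk, idxs, (e : Int)) ((pre.length : Int), "}")
                  = (true, br - 1, bk, idxs, (e : Int)) := by simp [pvStepA, hbr1]
              have hB : pvStepB (true, br, bk, pvRenderA code idxs, pre.drop e) "}"
                  = (true, br - 1, bk, pvRenderA code idxs, pre.drop e ++ ["}"]) := by
                simp [pvStepB, hbr1]
              rw [hA, hB]
              have htrig' : pvTrig rest' (br - 1) bk (decide (0 < e)) = true := by
                simp only [pvTrig] at htrig
                simpa [hbr1] using htrig
              have := ih (pre ++ ["}"]) (br - 1) bk idxs e (by simp [hcode]) (by simp; omega)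
                (by simp [List.count_append, h1])
                (by simp [List.count_append]; omega)
                (by simp [List.count_append]; omega)
                hiff htrig'
              simpa [List.drop_append_of_le_length he] using this
            · have hA : pvStepA (true, br, bk, idxs, (e : Int)) ((pre.length : Int), tok)
                  = (true, br, bk, idxs, (e : Int)) := by simp [pvStepA, hs, hlp, hrp, hlb, hrb]
              have hB : pvStepB (true, br, bk, pvRenderA code idxs, pre.drop e) tok
                  = (true, br, bk, pvRenderA code idxs, pre.drop e ++ [tok]) := by
                simp [pvStepB, hs, hlp, hrp, hlb, hrb]
              rw [hA, hB]
              have htrig' : pvTrig rest' br bk (decide (0 < e)) = true := by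
                simp only [pvTrig] at htrig
                simpa [hs, hlp, hrp, hlb, hrb] using htrig
              have := ih (pre ++ [tok]) br bk idxs e (by simp [hcode]) (by simp; omega)
                (by simp [List.count_append, List.count_nil, h1, hlb])
                (by simp [List.count_append, List.count_nil, hrb]; omega)
                (by simp [List.count_append, List.count_nil, hlp, hrp]; omega)
                hiff htrig'
              simpa [List.drop_append_of_le_length he] using this

lemma pv_trig_of_em (rest : List String) :
    ∀ (br bk : Int), "{" ∈ rest → pvTrig rest br bk true = true := by
  induction rest with
  | nil => intro br bk h; simp at h
  | cons t r ih =>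
    intro br bk h
    by_cases h1 : t = "{"
    · subst h1; simp [pvTrig]
    · have hm : "{" ∈ r := by
        rcases List.mem_cons.mp h with h' | h'
        · exact absurd h'.symm h1
        · exact h'
      simp only [pvTrig]
      split_ifs <;> first | rfl | exact ih _ _ hm

lemma pv_trig_of_D (rest : List String) :
    ∀ (br bk : Int) (em : Bool) (k : Nat),
      rest[k]? = some ";" →
      (rest.take k).count "{" = 0 →
      br = ((rest.take k).count "}" : Int) →
      bk + ((rest.take k).count "(" : Int) = ((rest.take k).count ")" : Int) →
      "{" ∈ rest.drop (k + 1) →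
      pvTrig rest br bk em = true := by
  induction rest with
  | nil => intro br bk em k hk; simp at hk
  | cons t r ih =>
    intro br bk em k hk h1 h2 h3 hm
    cases k with
    | zero =>
      have ht : t = ";" := by simpa using hk
      subst ht
      simp only [List.take_zero, List.count_nil] at h2 h3
      have hbr : br = 0 := by omega
      have hbk : bk = 0 := by omega
      subst hbr; subst hbk
      have hm' : "{" ∈ r := by simpa using hm
      have hstep : pvTrig (";" :: r) 0 0 em = pvTrig r 0 0 true := by
        simp [pvTrig]
      rw [hstep]
      exact pv_trig_of_em r _ _ hm'
    | succ k' =>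
      have hk' : r[k']? = some ";" := by simpa using hk
      have htake : (t :: r).take (k' + 1) = t :: r.take k' := by simp
      rw [htake] at h1 h2 h3
      have ht : t ≠ "{" := by
        intro h; subst h
        simp at h1
      have hm' : "{" ∈ r.drop (k' + 1) := by simpa using hm
      have hmr : "{" ∈ r := List.mem_of_mem_drop hm'
      have hc : ∀ c : String, c ≠ t → (t :: r.take k').count c = (r.take k').count c := by
        intro c hcne
        rw [List.count_cons]
        simp [beq_iff_eq]
        exact fun h => hcne h.symm
      have hct : (t :: r.take k').count t = (r.take k').count t + 1 := by
        rw [List.count_cons]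
        simp
      by_cases hsemi : t = ";" ∧ br = 0 ∧ bk = 0
      · obtain ⟨ht1, hbr, hbk⟩ := hsemi
        subst ht1; subst hbr; subst hbk
        have hstep : pvTrig (";" :: r) 0 0 em = pvTrig r 0 0 true := by simp [pvTrig]
        rw [hstep]
        exact pv_trig_of_em r _ _ hmr
      · by_cases hsem2 : t = ";"
        · subst hsem2
          have hz : ¬(br = 0 ∧ bk = 0) := fun hh => hsemi ⟨rfl, hh.1, hh.2⟩
          have hstep : pvTrig (";" :: r) br bk em = pvTrig r br bk em := by
            simp [pvTrig, hz]
          rw [hstep]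
          refine ih br bk em k' hk' ?_ ?_ ?_ hm'
          · rw [hc "{" (by decide)] at h1; exact h1
          · rw [hc "}" (by decide)] at h2; exact h2
          · rw [hc "(" (by decide), hc ")" (by decide)] at h3; exact h3
        · by_cases hlp : t = "("
          · subst hlp
            have hstep : pvTrig ("(" :: r) br bk em = pvTrig r br (bk + 1) em := by
              simp [pvTrig]
            rw [hstep]
            refine ih br (bk + 1) em k' hk' ?_ ?_ ?_ hm'
            · rw [hc "{" (by decide)] at h1; exact h1
            · rw [hc "}" (by decide)] at h2; exact h2
            · rw [hct, hc ")" (by decide)] at h3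
              push_cast at h3 ⊢
              omega
          · by_cases hrp : t = ")"
            · subst hrp
              have hstep : pvTrig (")" :: r) br bk em = pvTrig r br (bk - 1) em := by
                simp [pvTrig]
              rw [hstep]
              refine ih br (bk - 1) em k' hk' ?_ ?_ ?_ hm'
              · rw [hc "{" (by decide)] at h1; exact h1
              · rw [hc "}" (by decide)] at h2; exact h2
              · rw [hct, hc "(" (by decide)] at h3
                push_cast at h3 ⊢
                omega
            · by_cases hrb : t = "}"
              · subst hrb
                by_cases hbr1 : br = 1
                · have hstep : pvTrig ("}" :: r) br bk em = pvTrig r (br - 1) bk true := by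
                    simp [pvTrig, hbr1]
                  rw [hstep]
                  exact pv_trig_of_em r _ _ hmr
                · have hstep : pvTrig ("}" :: r) br bk em = pvTrig r (br - 1) bk em := by
                    simp [pvTrig, hbr1]
                  rw [hstep]
                  refine ih (br - 1) bk em k' hk' ?_ ?_ ?_ hm'
                  · rw [hc "{" (by decide)] at h1; exact h1
                  · rw [hct] at h2
                    push_cast at h2 ⊢
                    omega
                  · rw [hc "(" (by decide), hc ")" (by decide)] at h3; exact h3
              · have hstep : pvTrig (t :: r) br bk em = pvTrig r br bk em := by
                  simp [pvTrig, ht, hsem2, hlp, hrp, hrb]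
                rw [hstep]
                refine ih br bk em k' hk' ?_ ?_ ?_ hm'
                · rw [hc "{" (Ne.symm ht)] at h1; exact h1
                · rw [hc "}" (fun h => hrb h.symm)] at h2; exact h2
                · rw [hc "(" (fun h => hlp h.symm), hc ")" (fun h => hrp h.symm)] at h3; exact h3

-- ===== VERDICT (by name: the statement is the Claim_ definition above) =====
theorem split_code_to_blocks_spec : Claim_unchanged_split_code_to_blocks := by
  unfold Claim_unchanged_split_code_to_blocks
  intro code _
  unfold Spec_split_code_to_blocks
  intro hnD
  unfold split_code_to_blocks split_code_to_blocks_alt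
  have := pv_loop code hnD code [] true 0 0 [] 0 rfl (by simp)
    (by intro _; simp) (by intro _ _; rfl)
  simpa [pvRenderA, PySem.List.enumerate_nil] using this

theorem split_code_to_blocks_changed : Claim_changed_split_code_to_blocks := by
  unfold Claim_changed_split_code_to_blocks; decide

theorem split_code_to_blocks_tight : Claim_exact_split_code_to_blocks := by
  unfold Claim_exact_split_code_to_blocks
  intro code _ hd
  unfold D_split_code_to_blocks at hd
  rw [List.any_eq_true] at hd
  obtain ⟨i, hi, hp⟩ := hd
  simp only [Bool.and_eq_true, decide_eq_true_eq, List.any_eq_true, beq_iff_eq] at hp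
  obtain ⟨⟨⟨⟨hgi, hc1⟩, hc2⟩, hc3⟩, t, htm, htq⟩ := hp
  subst htq
  have htrig : pvTrig code 0 0 false = true :=
    pv_trig_of_D code 0 0 false i hgi hc1 (by simp [hc2]) (by omega) htm
  unfold split_code_to_blocks split_code_to_blocks_alt
  have := pv_loop_ne code code [] 0 0 [] 0 rfl (by simp) (by simp) (by simp) (by simp)
    (by simp) (by simpa using htrig)
  simpa [pvRenderA, PySem.List.enumerate_nil] using this
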